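-- pv_equiv track=rewrite | github.com/harmeetsinghop67-tech/library-management-system | library management.py | calculate_fine
-- ===== SOURCE A (Python) =====
-- def calculate_fine(extra_days):
--     fine = 0
--
--     for day in range(1, extra_days + 1):
--         if day <= 7:
--             fine += 10
--         elif day <= 14:
--             fine += 20
--         else:
--             fine += 60
--
--     return fine
-- ===== SOURCE B (Python) =====
-- def calculate_fine(extra_days):
--     if extra_days <= 0:
--         return 0
--     t1 = min(extra_days, 7)
--     t2 = min(extra_days, 14)
--     return 10 * t1 + 20 * (t2 - t1) + 60 * (extra_days - t2)
-- ===== Notes on version B (the rewrite author's own statement) =====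
-- stated objective: faster
-- what changed: Replaced the per-day loop summing tiered daily fines with a closed-form tier formula 10*min(d,7)+20*(min(d,14)-min(d,7))+60*(d-min(d,14)).
import Mathlib
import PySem

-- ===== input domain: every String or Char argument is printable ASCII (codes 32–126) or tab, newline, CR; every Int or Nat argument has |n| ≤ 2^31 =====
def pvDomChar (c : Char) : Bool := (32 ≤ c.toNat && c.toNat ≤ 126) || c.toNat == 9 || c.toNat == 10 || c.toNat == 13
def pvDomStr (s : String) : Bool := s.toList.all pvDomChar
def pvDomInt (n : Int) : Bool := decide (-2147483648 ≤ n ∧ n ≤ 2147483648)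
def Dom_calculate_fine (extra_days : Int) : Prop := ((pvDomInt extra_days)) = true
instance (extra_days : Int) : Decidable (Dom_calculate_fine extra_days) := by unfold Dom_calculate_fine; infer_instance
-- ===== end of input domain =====

-- B replaces A's per-day loop with a closed-form tier formula (O(1) instead of O(n)).

-- ===== PORT A =====
def calculate_fine (extra_days : Int) : Int :=
  (PySem.List.pyRange 1 (extra_days + 1) 1).foldl
    (fun fine day =>
      if day ≤ 7 then fine + 10
      else if day ≤ 14 then fine + 20
      else fine + 60) 0

-- ===== PORT B =====
def calculate_fine_alt (extra_days : Int) : Int :=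
  if extra_days ≤ 0 then 0
  else
    let t1 := min extra_days 7
    let t2 := min extra_days 14
    10 * t1 + 20 * (t2 - t1) + 60 * (extra_days - t2)

-- ===== PRECONDITION & SPEC =====
def Spec_calculate_fine (extra_days : Int) (out : Int) : Prop := out = calculate_fine_alt extra_days
instance (extra_days : Int) (out : Int) : Decidable (Spec_calculate_fine extra_days out) := by unfold Spec_calculate_fine; infer_instance

-- ===== CLAIM (what is proved, stated in full; the proofs are below) =====
def Claim_equal_calculate_fine : Prop := ∀ (extra_days : Int), Dom_calculate_fine extra_days → Spec_calculate_fine extra_days (calculate_fine extra_days)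

-- ===== LEMMAS AND PROOFS =====

theorem calculate_fine_nat (n : Nat) : calculate_fine (n : Int) = calculate_fine_alt (n : Int) := by
  induction n with
  | zero => decide
  | succ m ih =>
    unfold calculate_fine at *
    push_cast
    rw [PySem.List.pyRange_one_succ_right (show (1:Int) ≤ (m:Int)+1 by omega), List.foldl_append]
    simp only [List.foldl]
    rw [ih]
    unfold calculate_fine_alt
    simp only [min_def]
    push_cast
    split_ifs <;> omega

theorem calculate_fine_spec' (d : Int) : calculate_fine d = calculate_fine_alt d := by
  by_cases h : d ≤ 0
  · unfold calculate_fine calculate_fine_alt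
    rw [PySem.List.pyRange_one_eq_nil (by omega)]
    simp [h]
  · obtain ⟨n, rfl⟩ := Int.eq_ofNat_of_zero_le (by omega : (0:Int) ≤ d)
    exact calculate_fine_nat n

-- ===== VERDICT (by name: the statement is the Claim_ definition above) =====
theorem calculate_fine_spec : Claim_equal_calculate_fine := by
  intro d _
  unfold Spec_calculate_fine
  exact calculate_fine_spec' d
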